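-- pv_equiv track=rewrite | github.com/PavelMartinelli/Point_test | run.py | check_capacity
-- ===== SOURCE A (Python) =====
-- from dataclasses import dataclass
-- from enum import Enum
--
-- class EventType(Enum):
--     CHECK_OUT = 0
--     CHECK_IN = 1
--
-- @dataclass
-- class Event:
--     date: str
--     event_type: EventType
--
-- def create_events(guests: list) -> list[Event]:
--     events = []
--     for guest in guests:
--         events.append(Event(guest["check-in"], EventType.CHECK_IN))
--         events.append(Event(guest["check-out"], EventType.CHECK_OUT))
--     return events
--
-- def check_capacity(max_capacity: int, guests: list) -> bool:
--     events = create_events(guests)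
--     sorted_events = sorted(events, key=lambda e: (e.date, e.event_type.value))
--     count_guests = 0
--
--     for event in sorted_events:
--         if event.event_type == EventType.CHECK_IN:
--             count_guests += 1
--             if count_guests > max_capacity:
--                 return False
--         else:
--             count_guests -= 1
--     return True
-- ===== SOURCE B (Python) =====
-- def check_capacity(max_capacity: int, guests: list) -> bool:
--     # No sorting, no event sweep: occupancy at the instant of each guest's
--     # check-in (same-date check-outs already departed) is
--     #   #{h : h["check-in"] <= d} - #{h : h["check-out"] <= d};
--     # the sweep-line maximum is attained at such an instant, so it suffices
--     # to check this count for every guest's check-in date directly.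
--     for g in guests:
--         d = g["check-in"]
--         occupancy = 0
--         for h in guests:
--             if h["check-in"] <= d:
--                 occupancy += 1
--             if h["check-out"] <= d:
--                 occupancy -= 1
--         if occupancy > max_capacity:
--             return False
--     return True
-- ===== Notes on version B (the rewrite author's own statement) =====
-- stated objective: alternative
-- what changed: B drops the sort-and-sweep entirely: for each guest it directly counts, by a quadratic scan, how many check-ins are <= that guest's check-in date minus how many check-outs are <= it (same-date check-outs depart first), which equals the sweep's occupancy peak at that instant; it returns False iff some such count exceeds max_capacity.
import Mathlib
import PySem

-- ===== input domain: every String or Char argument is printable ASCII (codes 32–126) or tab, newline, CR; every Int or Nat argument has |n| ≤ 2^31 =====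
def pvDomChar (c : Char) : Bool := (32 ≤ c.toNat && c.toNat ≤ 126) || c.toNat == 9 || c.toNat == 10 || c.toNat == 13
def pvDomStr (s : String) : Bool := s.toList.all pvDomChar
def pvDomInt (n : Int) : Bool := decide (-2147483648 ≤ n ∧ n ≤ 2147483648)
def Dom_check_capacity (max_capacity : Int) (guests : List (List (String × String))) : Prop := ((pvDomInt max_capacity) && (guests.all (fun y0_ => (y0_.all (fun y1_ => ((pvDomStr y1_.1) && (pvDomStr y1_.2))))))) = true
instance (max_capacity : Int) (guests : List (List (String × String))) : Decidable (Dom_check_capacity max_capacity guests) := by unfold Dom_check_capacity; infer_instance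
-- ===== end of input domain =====

-- B drops the sort-and-sweep and instead checks, by direct quadratic counting, the
-- occupancy at each guest's check-in instant (alternative algorithm, not faster).

-- ===== PORT A =====
-- guest[k]: first-match lookup; Pre_ excludes the missing-key (KeyError) case, where this defaults to ""
def pvGet (g : List (String × String)) (k : String) : String := ((g.lookup k).getD "")

-- create_events: Event(date, event_type) ported as the pair (date, event_type.value), CHECK_IN = 1, CHECK_OUT = 0
def create_events (guests : List (List (String × String))) : List (String × Int) :=
  guests.foldl (fun events guest =>
    events ++ [(pvGet guest "check-in", 1), (pvGet guest "check-out", 0)]) []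

-- the 'for event in sorted_events' loop with its early return
def checkLoopA (max_capacity : Int) : List (String × Int) → Int → Bool
  | [], _ => true
  | e :: rest, count_guests =>
    if e.2 == 1 then
      if count_guests + 1 > max_capacity then false
      else checkLoopA max_capacity rest (count_guests + 1)
    else checkLoopA max_capacity rest (count_guests - 1)

-- key=lambda e: (e.date, e.event_type.value): Python's lexicographic tuple order is '<' on String ×ₗ Int
def check_capacity (max_capacity : Int) (guests : List (List (String × String))) : Bool :=
  checkLoopA max_capacity (PySem.List.sorted (create_events guests) (fun e => toLex e)) 0

-- ===== PORT B =====
-- the inner 'for h in guests' loop of Source B computing occupancy at instant d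
def occB (guests : List (List (String × String))) (d : String) : Int :=
  guests.foldl (fun occupancy h =>
    let occupancy := if pvGet h "check-in" ≤ d then occupancy + 1 else occupancy
    if pvGet h "check-out" ≤ d then occupancy - 1 else occupancy) 0

-- the outer 'for g in guests' loop with its early return
def goB (max_capacity : Int) (guests : List (List (String × String))) :
    List (List (String × String)) → Bool
  | [] => true
  | g :: rest =>
      if occB guests (pvGet g "check-in") > max_capacity then false
      else goB max_capacity guests rest

def check_capacity_alt (max_capacity : Int) (guests : List (List (String × String))) : Bool :=
  goB max_capacity guests guests

-- ===== PRECONDITION & SPEC =====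
-- Pre_ excludes exactly the guests with a missing "check-in"/"check-out" key, where A raises KeyError
def Pre_check_capacity (max_capacity : Int) (guests : List (List (String × String))) : Prop :=
  ∀ g ∈ guests, (g.lookup "check-in").isSome ∧ (g.lookup "check-out").isSome
instance (max_capacity : Int) (guests : List (List (String × String))) : Decidable (Pre_check_capacity max_capacity guests) := by unfold Pre_check_capacity; infer_instance

def pvWitness_check_capacity : Int × (List (List (String × String))) :=
  (1, [[("check-in", "2024-01-01"), ("check-out", "2024-01-03")],
       [("check-in", "2024-01-02"), ("check-out", "2024-01-04")]])

def Spec_check_capacity (max_capacity : Int) (guests : List (List (String × String))) (out : Bool) : Prop := out = check_capacity_alt max_capacity guests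
instance (max_capacity : Int) (guests : List (List (String × String))) (out : Bool) : Decidable (Spec_check_capacity max_capacity guests out) := by unfold Spec_check_capacity; infer_instance

-- ===== CLAIM (what is proved, stated in full; the proofs are below) =====
def Claim_equal_check_capacity : Prop := ∀ (max_capacity : Int) (guests : List (List (String × String))), Dom_check_capacity max_capacity guests → Pre_check_capacity max_capacity guests → Spec_check_capacity max_capacity guests (check_capacity max_capacity guests)

-- ===== LEMMAS AND PROOFS =====

-- the order A sorts events by: ≤ on String ×ₗ Int
def evLE (a b : String × Int) : Prop := toLex a ≤ toLex b

theorem evLE_iff (a b : String × Int) : evLE a b ↔ (a.1 < b.1 ∨ (a.1 = b.1 ∧ a.2 ≤ b.2)) :=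
  Prod.Lex.le_iff

-- signed running-count contribution of an event prefix
def net (l : List (String × Int)) : Int :=
  (l.countP (fun e => e.2 == 1) : Int) - (l.countP (fun e => !(e.2 == 1)))

theorem net_nil : net [] = 0 := by simp [net]

theorem net_cons_in (a : String) (p : List (String × Int)) :
    net ((a, (1 : Int)) :: p) = net p + 1 := by
  simp [net]; omega

theorem net_cons_out {t : Int} (ht : t ≠ 1) (a : String) (p : List (String × Int)) :
    net ((a, t) :: p) = net p - 1 := by
  simp [net, ht]; omega

-- characterization of A's loop: true iff every prefix ending at a check-in stays within cap
theorem checkA_iff (cap : Int) (evs : List (String × Int)) (c : Int) :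
    checkLoopA cap evs c = true ↔
      ∀ p d q, evs = p ++ (d, (1 : Int)) :: q → c + net p + 1 ≤ cap := by
  induction evs generalizing c with
  | nil =>
      constructor
      · intro _ p d q h; exact absurd h (by simp)
      · intro _; rfl
  | cons e rest ih =>
      obtain ⟨a, t⟩ := e
      by_cases ht : t = 1
      · subst ht
        simp only [checkLoopA, beq_self_eq_true, if_true]
        by_cases hc : c + 1 > cap
        · rw [if_pos hc]
          constructor
          · intro h; cases h
          · intro H
            have := H [] a rest rfl
            rw [net_nil] at this; omega
        · rw [if_neg hc, ih (c + 1)]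
          constructor
          · intro H p d q hpq
            cases p with
            | nil =>
                simp only [List.nil_append, List.cons.injEq] at hpq
                rw [net_nil]; omega
            | cons x p' =>
                simp only [List.cons_append, List.cons.injEq] at hpq
                obtain ⟨hx, hrest⟩ := hpq
                subst hx
                have := H p' d q hrest
                rw [net_cons_in]; omega
          · intro H p d q hpq
            have := H ((a, 1) :: p) d q (by simp [hpq])
            rw [net_cons_in] at this; omega
      · have hbeq : ((a, t).2 == (1 : Int)) = false := by
          simp [ht]
        simp only [checkLoopA, hbeq, Bool.false_eq_true, if_false]
        rw [ih (c - 1)]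
        constructor
        · intro H p d q hpq
          cases p with
          | nil =>
              simp only [List.nil_append, List.cons.injEq, Prod.mk.injEq] at hpq
              exact absurd hpq.1.2 ht
          | cons x p' =>
              simp only [List.cons_append, List.cons.injEq] at hpq
              obtain ⟨hx, hrest⟩ := hpq
              subst hx
              have := H p' d q hrest
              rw [net_cons_out ht]; omega
        · intro H p d q hpq
          have := H ((a, t) :: p) d q (by simp [hpq])
          rw [net_cons_out ht] at this; omega

-- check-ins / check-outs no later than d, among an event list
def pin (d : String) (e : String × Int) : Bool := e.2 == 1 && decide (e.1 ≤ d)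
def pout (d : String) (e : String × Int) : Bool := e.2 == 0 && decide (e.1 ≤ d)

theorem exists_last_split {α : Type} [DecidableEq α] {a : α} {l : List α} (h : a ∈ l) :
    ∃ p q, l = p ++ a :: q ∧ a ∉ q := by
  induction l with
  | nil => cases h
  | cons x t ih =>
      by_cases hat : a ∈ t
      · obtain ⟨p, q, h1, h2⟩ := ih hat
        exact ⟨x :: p, q, by simp [h1], h2⟩
      · rcases List.mem_cons.mp h with h | h
        · exact ⟨[], t, by simp [h], hat⟩
        · contradiction

-- helpers derived from sortedness of a split
theorem pin_on_left {d : String} {x : String × Int} (hx : evLE x (d, 1)) :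
    pin d x = (x.2 == 1) := by
  rcases (evLE_iff _ _).mp hx with h | ⟨h1, _⟩
  · by_cases h2 : x.2 = 1 <;> simp [pin, h2, le_of_lt h]
  · by_cases h2 : x.2 = 1 <;> simp [pin, h2, le_of_eq h1]

theorem pout_on_left {d : String} {x : String × Int}
    (hty : x.2 = 0 ∨ x.2 = 1) (hx : evLE x (d, 1)) :
    pout d x = (x.2 == 0) := by
  rcases (evLE_iff _ _).mp hx with h | ⟨h1, _⟩
  · by_cases h2 : x.2 = 0 <;> simp [pout, h2, le_of_lt h]
  · rcases hty with h2 | h2 <;> simp [pout, h2, le_of_eq h1]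

theorem pout_on_right {d : String} {y : String × Int} (hy : evLE (d, 1) y) :
    pout d y = false := by
  obtain ⟨y1, y2⟩ := y
  rcases (evLE_iff _ _).mp hy with h | ⟨h1, h2⟩
  · by_cases h3 : y2 = 0 <;> simp [pout, h3, not_le.mpr h]
  · have h3 : y2 ≠ 0 := by simp at h2; omega
    simp [pout, h3]

theorem pin_on_right {d : String} {y : String × Int}
    (hy : evLE (d, 1) y) (hne : y ≠ (d, 1)) : pin d y = false := by
  obtain ⟨y1, y2⟩ := y
  rcases (evLE_iff _ _).mp hy with h | ⟨h1, h2⟩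
  · by_cases h3 : y2 = 1 <;> simp [pin, h3, not_le.mpr h]
  · by_cases h3 : y2 = 1
    · have hd : y1 = d := by simpa using h1.symm
      exact absurd (by rw [hd, h3]) hne
    · simp [pin, h3]

-- net of a pure-typed prefix counts ins minus outs
theorem net_eq_counts {p : List (String × Int)} (hty : ∀ e ∈ p, e.2 = 0 ∨ e.2 = 1) :
    net p = (p.countP (fun e => e.2 == 1) : Int) - p.countP (fun e => e.2 == 0) := by
  unfold net
  have : p.countP (fun e => !(e.2 == 1)) = p.countP (fun e => e.2 == 0) := by
    apply List.countP_congr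
    intro e he
    rcases hty e he with h | h <;> simp [h]
  rw [this]

-- occupancy at instant d, over the sorted event list
def fS (S : List (String × Int)) (d : String) : Int :=
  (S.countP (pin d) : Int) - S.countP (pout d)

-- the split condition over a sorted event list reduces to per-date occupancy bounds
theorem sorted_iff (cap : Int) (S : List (String × Int))
    (hs : S.Pairwise evLE) (hty : ∀ e ∈ S, e.2 = 0 ∨ e.2 = 1) :
    (∀ p d q, S = p ++ (d, (1 : Int)) :: q → net p + 1 ≤ cap) ↔
      (∀ d, (d, (1 : Int)) ∈ S → fS S d ≤ cap) := by
  constructor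
  · intro H d hd
    obtain ⟨p, q, hpq, hnq⟩ := exists_last_split hd
    have hineq := H p d q hpq
    subst hpq
    rw [List.pairwise_append] at hs
    obtain ⟨hp, hdq, hrel⟩ := hs
    rw [List.pairwise_cons] at hdq
    have hxle : ∀ x ∈ p, evLE x (d, 1) :=
      fun x hx => hrel x hx _ (List.mem_cons_self ..)
    have htyp : ∀ e ∈ p, e.2 = 0 ∨ e.2 = 1 :=
      fun e he => hty e (by simp [he])
    have h1 : p.countP (pin d) = p.countP (fun e => e.2 == 1) :=
      List.countP_congr (fun x hx => by rw [pin_on_left (hxle x hx)])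
    have h2 : p.countP (pout d) = p.countP (fun e => e.2 == 0) :=
      List.countP_congr (fun x hx => by rw [pout_on_left (htyp x hx) (hxle x hx)])
    have h3 : q.countP (pin d) = 0 :=
      List.countP_eq_zero.mpr (fun y hy => by
        simp [pin_on_right (hdq.1 y hy) (fun h => hnq (h ▸ hy))])
    have h4 : q.countP (pout d) = 0 :=
      List.countP_eq_zero.mpr (fun y hy => by simp [pout_on_right (hdq.1 y hy)])
    have h5 : pin d (d, (1 : Int)) = true := by simp [pin]
    have h6 : pout d (d, (1 : Int)) = false := by simp [pout]
    unfold fS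
    rw [List.countP_append, List.countP_append, List.countP_cons, List.countP_cons,
        h1, h2, h3, h4, h5, h6]
    rw [net_eq_counts htyp] at hineq
    simp only [if_true, Bool.false_eq_true, if_false]
    omega
  · intro H p d q hpq
    have hd : (d, (1 : Int)) ∈ S := by rw [hpq]; simp
    have hfd := H d hd
    subst hpq
    rw [List.pairwise_append] at hs
    obtain ⟨hp, hdq, hrel⟩ := hs
    rw [List.pairwise_cons] at hdq
    have hxle : ∀ x ∈ p, evLE x (d, 1) :=
      fun x hx => hrel x hx _ (List.mem_cons_self ..)
    have htyp : ∀ e ∈ p, e.2 = 0 ∨ e.2 = 1 :=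
      fun e he => hty e (by simp [he])
    have h1 : p.countP (pin d) = p.countP (fun e => e.2 == 1) :=
      List.countP_congr (fun x hx => by rw [pin_on_left (hxle x hx)])
    have h2 : p.countP (pout d) = p.countP (fun e => e.2 == 0) :=
      List.countP_congr (fun x hx => by rw [pout_on_left (htyp x hx) (hxle x hx)])
    have h4 : q.countP (pout d) = 0 :=
      List.countP_eq_zero.mpr (fun y hy => by simp [pout_on_right (hdq.1 y hy)])
    have h5 : pin d (d, (1 : Int)) = true := by simp [pin]
    have h6 : pout d (d, (1 : Int)) = false := by simp [pout]
    unfold fS at hfd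
    rw [List.countP_append, List.countP_append, List.countP_cons, List.countP_cons,
        h1, h2, h4, h5, h6] at hfd
    rw [net_eq_counts htyp]
    simp only [if_true, Bool.false_eq_true, if_false] at hfd
    push_cast at hfd ⊢
    omega

-- create_events as a flatMap
theorem create_events_eq (guests : List (List (String × String))) :
    create_events guests =
      guests.flatMap (fun g => [(pvGet g "check-in", (1 : Int)), (pvGet g "check-out", (0 : Int))]) := by
  unfold create_events
  simpa using PySem.List.foldl_append_eq_flatMap
    (fun guest => [(pvGet guest "check-in", (1 : Int)), (pvGet guest "check-out", (0 : Int))]) guests []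

theorem countP_events_in (guests : List (List (String × String))) (d : String) :
    (create_events guests).countP (pin d) =
      guests.countP (fun g => decide (pvGet g "check-in" ≤ d)) := by
  rw [create_events_eq]
  induction guests with
  | nil => rfl
  | cons g gs ih =>
      simp only [List.flatMap_cons, List.countP_append, List.countP_cons, ih]
      simp [pin]
      omega

theorem countP_events_out (guests : List (List (String × String))) (d : String) :
    (create_events guests).countP (pout d) =
      guests.countP (fun g => decide (pvGet g "check-out" ≤ d)) := by
  rw [create_events_eq]
  induction guests with
  | nil => rfl
  | cons g gs ih =>
      simp only [List.flatMap_cons, List.countP_append, List.countP_cons, ih]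
      simp [pout]
      omega

theorem mem_events_in (guests : List (List (String × String))) (d : String) :
    (d, (1 : Int)) ∈ create_events guests ↔ ∃ g ∈ guests, pvGet g "check-in" = d := by
  rw [create_events_eq]
  simp only [List.mem_flatMap, List.mem_cons, List.not_mem_nil, or_false, Prod.mk.injEq]
  constructor
  · rintro ⟨g, hg, ⟨h1, _⟩ | ⟨h1, h2⟩⟩
    · exact ⟨g, hg, h1.symm⟩
    · exact absurd h2 (by norm_num)
  · rintro ⟨g, hg, h⟩
    exact ⟨g, hg, Or.inl ⟨h.symm, trivial⟩⟩

theorem types_events (guests : List (List (String × String))) :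
    ∀ e ∈ create_events guests, e.2 = 0 ∨ e.2 = 1 := by
  rw [create_events_eq]
  intro e he
  simp only [List.mem_flatMap, List.mem_cons, List.not_mem_nil, or_false] at he
  rcases he with ⟨g, _, h | h⟩
  · right; rw [h]
  · left; rw [h]

-- B's inner loop computes the same two counts
theorem occB_eq (guests : List (List (String × String))) (d : String) :
    occB guests d =
      (guests.countP (fun g => decide (pvGet g "check-in" ≤ d)) : Int) -
        guests.countP (fun g => decide (pvGet g "check-out" ≤ d)) := by
  suffices h : ∀ (l : List (List (String × String))) (acc : Int),
      l.foldl (fun occupancy h =>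
        let occupancy := if pvGet h "check-in" ≤ d then occupancy + 1 else occupancy
        if pvGet h "check-out" ≤ d then occupancy - 1 else occupancy) acc =
      acc + (l.countP (fun g => decide (pvGet g "check-in" ≤ d)) : Int) -
        l.countP (fun g => decide (pvGet g "check-out" ≤ d)) by
    unfold occB; rw [h]; omega
  intro l
  induction l with
  | nil => intro acc; simp
  | cons g gs ih =>
      intro acc
      simp only [List.foldl_cons, List.countP_cons, ih]
      by_cases h1 : pvGet g "check-in" ≤ d <;>
        by_cases h2 : pvGet g "check-out" ≤ d <;>
          simp [h1, h2] <;> push_cast <;> omega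

-- B's outer loop with early return: all-quantified characterization
theorem goB_iff (cap : Int) (guests l : List (List (String × String))) :
    goB cap guests l = true ↔ ∀ g ∈ l, occB guests (pvGet g "check-in") ≤ cap := by
  induction l with
  | nil => simp [goB]
  | cons g rest ih =>
      simp only [goB]
      by_cases h : occB guests (pvGet g "check-in") > cap
      · rw [if_pos h]
        simp only [Bool.false_eq_true, false_iff]
        intro H
        exact absurd (H g (List.mem_cons_self ..)) (by omega)
      · rw [if_neg h, ih]
        constructor
        · intro H x hx
          rcases List.mem_cons.mp hx with hx | hx
          · subst hx; omega
          · exact H x hx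
        · intro H x hx; exact H x (by simp [hx])

-- ===== VERDICT (by name: the statement is the Claim_ definition above) =====
theorem check_capacity_spec : Claim_equal_check_capacity := by
  intro cap guests _ _
  unfold Spec_check_capacity check_capacity check_capacity_alt
  set S := PySem.List.sorted (create_events guests) (fun e => toLex e) with hS
  have hperm : S.Perm (create_events guests) := PySem.List.sorted_perm _ _ _
  have hpair : S.Pairwise evLE := PySem.List.sorted_pairwise (create_events guests) _
  have hty : ∀ e ∈ S, e.2 = 0 ∨ e.2 = 1 :=
    fun e he => types_events guests e (hperm.mem_iff.mp he)
  rw [Bool.eq_iff_iff, checkA_iff, goB_iff]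
  have hzero : (∀ p d q, S = p ++ (d, (1 : Int)) :: q → 0 + net p + 1 ≤ cap) ↔
      (∀ p d q, S = p ++ (d, (1 : Int)) :: q → net p + 1 ≤ cap) := by
    constructor <;> intro H p d q h <;> have := H p d q h <;> omega
  rw [hzero, sorted_iff cap S hpair hty]
  constructor
  · intro H g hg
    have hmem : (pvGet g "check-in", (1 : Int)) ∈ S :=
      hperm.mem_iff.mpr ((mem_events_in guests _).mpr ⟨g, hg, rfl⟩)
    have := H _ hmem
    unfold fS at this
    rw [hperm.countP_eq, hperm.countP_eq, countP_events_in, countP_events_out] at this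
    rw [occB_eq]; exact this
  · intro H d hd
    obtain ⟨g, hg, hgd⟩ := (mem_events_in guests d).mp (hperm.mem_iff.mp hd)
    have := H g hg
    rw [occB_eq, hgd] at this
    unfold fS
    rw [hperm.countP_eq, hperm.countP_eq, countP_events_in, countP_events_out]
    exact this
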